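-- pv_equiv track=rewrite | github.com/kurta17/problem-solving | algorithm and data structure 2/HW6/B. Circular Shift.py | right_circular_shift
-- ===== SOURCE A (Python) =====
-- def compute_lps(pattern):
--     length = 0
--     lps = [0] * len(pattern)
--     i = 1
--     while i < len(pattern):
--         if pattern[i] == pattern[length]:
--             length += 1
--             lps[i] = length
--             i += 1
--         else:
--             if length != 0:
--                 length = lps[length - 1]
--             else:
--                 lps[i] = 0
--                 i += 1
--     return lps
--
-- def right_circular_shift(s1, s2):
--     if len(s1) != len(s2):
--         return -1
--
--     combined_string = s1 + s1
--     lps = compute_lps(s2)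
--     n = len(s2)
--
--     i = 0
--     j = 0
--     while i < len(combined_string):
--         if s2[j] == combined_string[i]:
--             i += 1
--             j += 1
--
--             if j == n:
--                 return (len(s1) - (i - j)) % n
--         else:
--             if j != 0:
--                 j = lps[j - 1]
--             else:
--                 i += 1
--     return -1
-- ===== SOURCE B (Python) =====
-- def right_circular_shift(s1, s2):
--     if len(s1) != len(s2):
--         return -1
--     n = len(s1)
--     doubled = s1 + s1
--     for start in range(n):
--         if doubled[start:start + n] == s2:
--             return (n - start) % n
--     return -1
-- ===== Notes on version B (the rewrite author's own statement) =====
-- stated objective: simpler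
-- what changed: Replaced the hand-written KMP (failure-function table plus two-pointer matcher over s1+s1) by a direct scan: for each start in range(n) compare the window doubled[start:start+n] with s2 and return (n-start)%n at the first match.
import Mathlib
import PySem

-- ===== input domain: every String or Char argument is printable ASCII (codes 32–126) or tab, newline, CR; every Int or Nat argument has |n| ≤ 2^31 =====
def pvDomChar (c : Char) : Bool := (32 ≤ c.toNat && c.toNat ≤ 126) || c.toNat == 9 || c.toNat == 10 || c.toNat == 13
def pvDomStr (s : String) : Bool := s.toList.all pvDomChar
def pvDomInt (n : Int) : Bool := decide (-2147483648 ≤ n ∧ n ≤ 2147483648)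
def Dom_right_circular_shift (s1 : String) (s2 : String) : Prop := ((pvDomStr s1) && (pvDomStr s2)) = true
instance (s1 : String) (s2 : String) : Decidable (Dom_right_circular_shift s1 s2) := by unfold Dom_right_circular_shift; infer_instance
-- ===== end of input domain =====

-- B replaces A's hand-written KMP (failure table + two-pointer scan over s1+s1) by a simpler direct
-- window scan over the doubled string; same return value everywhere; no speed claim.

-- ===== PORT A =====
-- compute_lps: the while loop does not structurally descend (on mismatch only `length` shrinks via the
-- table), so it is ported with a fuel counter; fuel 2*len(p)+1 is proved sufficient below (the measure
-- 2*i - length grows each iteration), so the fuel-0 branch is never reached: totality guard only.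
def lpsGo (p : List Char) (fuel : Nat) (length : Nat) (lps : List Nat) (i : Nat) : List Nat :=
  match fuel with
  | 0 => lps
  | fuel + 1 =>
    if i < p.length then
      if p.getD i ' ' == p.getD length ' ' then
        lpsGo p fuel (length + 1) (lps.set i (length + 1)) (i + 1)
      else if length ≠ 0 then
        lpsGo p fuel (lps.getD (length - 1) 0) lps i
      else
        lpsGo p fuel 0 (lps.set i 0) (i + 1)
    else lps

def compute_lps (p : List Char) : List Nat :=
  lpsGo p (2 * p.length + 1) 0 (List.replicate p.length 0) 1

-- the KMP matching while loop of right_circular_shift, same fuel-for-totality device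
def kmpGo (t p : List Char) (lps : List Nat) (n1 : Nat) (fuel i j : Nat) : Int :=
  match fuel with
  | 0 => -1
  | fuel + 1 =>
    if i < t.length then
      if p.getD j ' ' == t.getD i ' ' then
        if j + 1 = p.length then
          PySem.Int.mod ((n1 : Int) - (((i : Int) + 1) - ((j : Int) + 1))) (p.length : Int)
        else
          kmpGo t p lps n1 fuel (i + 1) (j + 1)
      else if j ≠ 0 then
        kmpGo t p lps n1 fuel i (lps.getD (j - 1) 0)
      else
        kmpGo t p lps n1 fuel (i + 1) j
    else -1

def right_circular_shift (s1 : String) (s2 : String) : Int :=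
  if s1.toList.length ≠ s2.toList.length then -1
  else
    let combined := s1.toList ++ s1.toList
    let lps := compute_lps s2.toList
    kmpGo combined s2.toList lps s1.toList.length (2 * combined.length + 1) 0 0

-- ===== PORT B =====
-- the `for start in range(n)` loop of Source B, early return on the first matching window
def altGo (doubled p : List Char) (n : Nat) (start : Nat) : Int :=
  if h : start < n then
    if (doubled.drop start).take n == p then
      PySem.Int.mod ((n : Int) - (start : Int)) (n : Int)
    else altGo doubled p n (start + 1)
  else -1
termination_by n - start

def right_circular_shift_alt (s1 : String) (s2 : String) : Int :=
  if s1.toList.length ≠ s2.toList.length then -1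
  else altGo (s1.toList ++ s1.toList) s2.toList s1.toList.length 0

-- ===== PRECONDITION & SPEC =====
def Spec_right_circular_shift (s1 : String) (s2 : String) (out : Int) : Prop := out = right_circular_shift_alt s1 s2
instance (s1 : String) (s2 : String) (out : Int) : Decidable (Spec_right_circular_shift s1 s2 out) := by unfold Spec_right_circular_shift; infer_instance

-- ===== CLAIM (what is proved, stated in full; the proofs are below) =====
def Claim_equal_right_circular_shift : Prop := ∀ (s1 : String) (s2 : String), Dom_right_circular_shift s1 s2 → Spec_right_circular_shift s1 s2 (right_circular_shift s1 s2)

-- ===== LEMMAS AND PROOFS =====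

-- `bmax p j` = length of the longest proper border (prefix that is also a suffix) of p.take j
def bmax (p : List Char) (j : Nat) : Nat :=
  Nat.findGreatest (fun k => k < j ∧ p.take k <:+ p.take j) j

lemma bmax_bord (p : List Char) (j : Nat) (hj : 1 ≤ j) :
    bmax p j < j ∧ p.take (bmax p j) <:+ p.take j :=
  Nat.findGreatest_spec (P := fun k => k < j ∧ p.take k <:+ p.take j) (Nat.zero_le j) ⟨hj, by simp⟩

lemma le_bmax (p : List Char) {j k : Nat} (hk : k < j) (hs : p.take k <:+ p.take j) :
    k ≤ bmax p j :=
  Nat.le_findGreatest (Nat.le_of_lt hk) ⟨hk, hs⟩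

-- suffix extension lemma: appending one matching character on each side
lemma suffix_concat_iff (u v : List Char) (a b : Char) :
    u ++ [a] <:+ v ++ [b] ↔ u <:+ v ∧ a = b := by
  rw [← List.reverse_prefix]
  simp only [List.reverse_append, List.reverse_cons, List.reverse_nil, List.nil_append,
    List.singleton_append, List.cons_prefix_cons, List.reverse_prefix]
  tauto

lemma suffix_take_succ_iff (p t : List Char) (k i : Nat) (hk : k < p.length) (hi : i < t.length) :
    p.take (k + 1) <:+ t.take (i + 1) ↔ p.take k <:+ t.take i ∧ p.getD k ' ' = t.getD i ' ' := by
  rw [List.take_add_one, List.take_add_one, List.getElem?_eq_getElem hk, List.getElem?_eq_getElem hi,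
    List.getD_eq_getElem p ' ' hk, List.getD_eq_getElem t ' ' hi]
  exact suffix_concat_iff _ _ _ _

-- occurrence at s, as a suffix of a prefix
lemma occ_iff_suffix (t p : List Char) (s m : Nat) (hm : s + p.length = m) (hmt : m ≤ t.length) :
    (t.drop s).take p.length = p ↔ p <:+ t.take m := by
  rw [List.suffix_iff_eq_drop, List.length_take, List.drop_take]
  have h1 : min m t.length = m := by omega
  have h3 : m - p.length = s := by omega
  have h4 : m - s = p.length := by omega
  rw [h1, h3, h4, eq_comm]

lemma getD_set_self (l : List Nat) (i v : Nat) (h : i < l.length) :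
    (l.set i v).getD i 0 = v := by
  simp [List.getD_eq_getElem?_getD, List.getElem?_set_self h]

lemma getD_set_ne (l : List Nat) (i m v : Nat) (h : i ≠ m) :
    (l.set i v).getD m 0 = l.getD m 0 := by
  simp [List.getD_eq_getElem?_getD, List.getElem?_set_ne h]

-- ===== correctness of compute_lps =====

def LpsInv (p : List Char) (i length : Nat) (lps : List Nat) : Prop :=
  length < i ∧ lps.length = p.length ∧
  (∀ m, m < i → m < p.length → lps.getD m 0 = bmax p (m + 1)) ∧
  p.take length <:+ p.take i ∧
  (∀ k, k < i → i < p.length → p.take k <:+ p.take i → p.getD k ' ' = p.getD i ' ' → k ≤ length)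

lemma lpsGo_spec (p : List Char) (fuel i length : Nat) (lps : List Nat)
    (hInv : LpsInv p i length lps) (hi : i ≤ p.length)
    (hfuel : 2 * (p.length - i) + length < fuel) :
    ∀ m, m < p.length → (lpsGo p fuel length lps i).getD m 0 = bmax p (m + 1) := by
  induction fuel generalizing i length lps with
  | zero => omega
  | succ fuel ih =>
    obtain ⟨hli, hlen, hent, hsuf, hcand⟩ := hInv
    rw [lpsGo]
    split_ifs with hiL h1 h2
    · -- match: p[i] == p[length]
      have heq : p.getD i ' ' = p.getD length ' ' := by simpa using h1
      have hlL : length < p.length := by omega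
      have hb : p.take (length + 1) <:+ p.take (i + 1) :=
        (suffix_take_succ_iff p p length i hlL hiL).mpr ⟨hsuf, heq.symm⟩
      have hbm : bmax p (i + 1) = length + 1 := by
        have hge : length + 1 ≤ bmax p (i + 1) := le_bmax p (by omega) hb
        have hle : bmax p (i + 1) ≤ length + 1 := by
          obtain ⟨hblt, hbsuf⟩ := bmax_bord p (i + 1) (by omega)
          cases hbe : bmax p (i + 1) with
          | zero => omega
          | succ k =>
            rw [hbe] at hbsuf hblt
            obtain ⟨hks, hkeq⟩ := (suffix_take_succ_iff p p k i (by omega) hiL).mp hbsuf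
            have := hcand k (by omega) hiL hks hkeq
            omega
        omega
      refine ih (i + 1) (length + 1) (lps.set i (length + 1))
        ⟨by omega, by simpa using hlen, ?_, hb, ?_⟩ (by omega) (by omega)
      · intro m hm1 hm2
        by_cases hmi : m = i
        · subst hmi
          rw [getD_set_self lps m (length + 1) (by omega), hbm]
        · rw [getD_set_ne lps i m (length + 1) (fun h => hmi h.symm)]
          exact hent m (by omega) hm2
      · intro k hk1 hk2 hks hkeq
        match k with
        | 0 => omega
        | k + 1 =>
          obtain ⟨hks', hkeq'⟩ := (suffix_take_succ_iff p p k i (by omega) hiL).mp hks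
          have := hcand k (by omega) hiL hks' hkeq'
          omega
    · -- mismatch, length ≠ 0
      have hne : p.getD i ' ' ≠ p.getD length ' ' := by simpa using h1
      have hval : lps.getD (length - 1) 0 = bmax p length := by
        have := hent (length - 1) (by omega) (by omega)
        rwa [Nat.sub_add_cancel (by omega)] at this
      obtain ⟨hblt, hbsuf⟩ := bmax_bord p length (by omega)
      rw [hval]
      refine ih i (bmax p length) lps
        ⟨by omega, hlen, hent, hbsuf.trans hsuf, ?_⟩ hi (by omega)
      intro k hk1 hk2 hks hkeq
      have hkl : k ≤ length := hcand k hk1 hk2 hks hkeq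
      have hkne : k ≠ length := by
        intro h; subst h; exact hne hkeq.symm
      have hkls : p.take k <:+ p.take length := by
        refine List.suffix_of_suffix_length_le hks hsuf ?_
        rw [List.length_take, List.length_take]; omega
      exact le_bmax p (by omega) hkls
    · -- mismatch, length = 0
      have hl0 : length = 0 := by omega
      subst hl0
      have hne : p.getD i ' ' ≠ p.getD 0 ' ' := by simpa using h1
      have hbm : bmax p (i + 1) = 0 := by
        obtain ⟨hblt, hbsuf⟩ := bmax_bord p (i + 1) (by omega)
        cases hbe : bmax p (i + 1) with
        | zero => rfl
        | succ k =>
          rw [hbe] at hbsuf hblt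
          obtain ⟨hks, hkeq⟩ := (suffix_take_succ_iff p p k i (by omega) hiL).mp hbsuf
          have hk0 : k = 0 := by have := hcand k (by omega) hiL hks hkeq; omega
          subst hk0
          exact absurd hkeq.symm hne
      refine ih (i + 1) 0 (lps.set i 0)
        ⟨by omega, by simpa using hlen, ?_, by simp, ?_⟩ (by omega) (by omega)
      · intro m hm1 hm2
        by_cases hmi : m = i
        · subst hmi
          rw [getD_set_self lps m 0 (by omega), hbm]
        · rw [getD_set_ne lps i m 0 (fun h => hmi h.symm)]
          exact hent m (by omega) hm2
      · intro k hk1 hk2 hks hkeq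
        match k with
        | 0 => omega
        | k + 1 =>
          obtain ⟨hks', hkeq'⟩ := (suffix_take_succ_iff p p k i (by omega) hiL).mp hks
          have hk0 : k = 0 := by have := hcand k (by omega) hiL hks' hkeq'; omega
          subst hk0
          exact absurd hkeq'.symm hne
    · -- loop exit
      intro m hm
      exact hent m (by omega) hm

lemma compute_lps_spec (p : List Char) (hp : 1 ≤ p.length) :
    ∀ m, m < p.length → (compute_lps p).getD m 0 = bmax p (m + 1) := by
  have hb1 : bmax p 1 = 0 := by
    have := (bmax_bord p 1 le_rfl).1; omega
  refine lpsGo_spec p (2 * p.length + 1) 1 0 (List.replicate p.length 0)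
    ⟨by omega, by simp, ?_, by simp, ?_⟩ hp (by omega)
  · intro m hm1 hm2
    interval_cases m
    simp [List.getD_eq_getElem?_getD, hb1]
  · intro k hk1 _ _ _
    omega

-- ===== correctness of the KMP matching loop =====

def KmpInv (t p : List Char) (i j : Nat) : Prop :=
  j ≤ i ∧ j < p.length ∧
  p.take j <:+ t.take i ∧
  (∀ k, k < p.length → i < t.length → p.take k <:+ t.take i → p.getD k ' ' = t.getD i ' ' → k ≤ j) ∧
  (∀ s, s + p.length ≤ i → (t.drop s).take p.length ≠ p)

lemma kmpGo_spec (t p : List Char) (lps : List Nat) (n1 : Nat) (opt : Option Nat)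
    (hlps : ∀ m, m < p.length → lps.getD m 0 = bmax p (m + 1))
    (hopt : match opt with
            | some s => s + p.length ≤ t.length ∧ (t.drop s).take p.length = p ∧
                        ∀ u, u < s → (t.drop u).take p.length ≠ p
            | none => ∀ u, u + p.length ≤ t.length → (t.drop u).take p.length ≠ p) :
    ∀ fuel i j, KmpInv t p i j → 2 * (t.length - i) + j < fuel →
    kmpGo t p lps n1 fuel i j =
      (match opt with
       | some s => PySem.Int.mod ((n1 : Int) - (s : Int)) (p.length : Int)
       | none => -1) := by
  intro fuel
  induction fuel with
  | zero => intro i j _ h; omega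
  | succ fuel ih =>
    intro i j hInv hfuel
    obtain ⟨hji, hjp, hsuf, hcand, hocc⟩ := hInv
    rw [kmpGo]
    split_ifs with hit hb hret hj0
    · -- match and j + 1 = p.length : return
      have heq : p.getD j ' ' = t.getD i ' ' := by simpa using hb
      have hsuf' : p.take (j + 1) <:+ t.take (i + 1) :=
        (suffix_take_succ_iff p t j i hjp hit).mpr ⟨hsuf, heq⟩
      rw [hret, List.take_length] at hsuf'
      have hoccS : (t.drop (i - j)).take p.length = p :=
        (occ_iff_suffix t p (i - j) (i + 1) (by omega) (by omega)).mpr hsuf'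
      have hminS : ∀ u, u < i - j → (t.drop u).take p.length ≠ p := by
        intro u hu
        exact hocc u (by omega)
      match hoe : opt with
      | none => exact absurd hoccS (hopt (i - j) (by omega))
      | some s =>
        obtain ⟨hsl, hsocc, hsmin⟩ := hopt
        have hss : s = i - j := by
          rcases lt_trichotomy s (i - j) with h | h | h
          · exact absurd hsocc (hocc s (by omega))
          · exact h
          · exact absurd hoccS (hsmin (i - j) h)
        have harg : (n1 : Int) - (((i : Int) + 1) - ((j : Int) + 1)) = (n1 : Int) - ((i - j : Nat) : Int) := by
          omega
        subst hss
        rw [harg]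
    · -- match, continue
      have heq : p.getD j ' ' = t.getD i ' ' := by simpa using hb
      have hsuf' : p.take (j + 1) <:+ t.take (i + 1) :=
        (suffix_take_succ_iff p t j i hjp hit).mpr ⟨hsuf, heq⟩
      refine ih (i + 1) (j + 1) ⟨by omega, by omega, hsuf', ?_, ?_⟩ (by omega)
      · intro k hk1 hk2 hks hkeq
        match k with
        | 0 => omega
        | k + 1 =>
          obtain ⟨hks', hkeq'⟩ := (suffix_take_succ_iff p t k i (by omega) hit).mp hks
          have := hcand k (by omega) hit hks' hkeq'
          omega
      · intro s hs hso
        rcases Nat.lt_or_ge (s + p.length) (i + 1) with hlt | hge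
        · exact hocc s (by omega) hso
        · have hsm : s + p.length = i + 1 := by omega
          have hps : p <:+ t.take (i + 1) :=
            (occ_iff_suffix t p s (i + 1) hsm (by omega)).mp hso
          have hLp : p.length - 1 + 1 = p.length := by omega
          have hps' : p.take (p.length - 1 + 1) <:+ t.take (i + 1) := by
            rw [hLp, List.take_length]; exact hps
          obtain ⟨hks', hkeq'⟩ :=
            (suffix_take_succ_iff p t (p.length - 1) i (by omega) hit).mp hps'
          have := hcand (p.length - 1) (by omega) hit hks' hkeq'
          omega
    · -- mismatch, j ≠ 0
      have hne : p.getD j ' ' ≠ t.getD i ' ' := by simpa using hb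
      have hval : lps.getD (j - 1) 0 = bmax p j := by
        have := hlps (j - 1) (by omega)
        rwa [Nat.sub_add_cancel (by omega)] at this
      obtain ⟨hblt, hbsuf⟩ := bmax_bord p j (by omega)
      rw [hval]
      refine ih i (bmax p j) ⟨by omega, by omega, hbsuf.trans hsuf, ?_, hocc⟩ (by omega)
      intro k hk1 hk2 hks hkeq
      have hkl : k ≤ j := hcand k hk1 hk2 hks hkeq
      have hkne : k ≠ j := by
        intro h; subst h; exact hne hkeq
      have hkls : p.take k <:+ p.take j := by
        refine List.suffix_of_suffix_length_le hks hsuf ?_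
        rw [List.length_take, List.length_take]; omega
      exact le_bmax p (by omega) hkls
    · -- mismatch, j = 0
      have hne : p.getD j ' ' ≠ t.getD i ' ' := by simpa using hb
      have hj : j = 0 := by omega
      subst hj
      refine ih (i + 1) 0 ⟨by omega, by omega, by simp, ?_, ?_⟩ (by omega)
      · intro k hk1 hk2 hks hkeq
        match k with
        | 0 => omega
        | k + 1 =>
          obtain ⟨hks', hkeq'⟩ := (suffix_take_succ_iff p t k i (by omega) hit).mp hks
          have hk0 : k = 0 := by have := hcand k (by omega) hit hks' hkeq'; omega
          subst hk0
          exact absurd hkeq' hne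
      · intro s hs hso
        rcases Nat.lt_or_ge (s + p.length) (i + 1) with hlt | hge
        · exact hocc s (by omega) hso
        · have hsm : s + p.length = i + 1 := by omega
          have hps : p <:+ t.take (i + 1) :=
            (occ_iff_suffix t p s (i + 1) hsm (by omega)).mp hso
          have hLp : p.length - 1 + 1 = p.length := by omega
          have hps' : p.take (p.length - 1 + 1) <:+ t.take (i + 1) := by
            rw [hLp, List.take_length]; exact hps
          obtain ⟨hks', hkeq'⟩ :=
            (suffix_take_succ_iff p t (p.length - 1) i (by omega) hit).mp hps'
          have hk0 : p.length - 1 = 0 := by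
            have := hcand (p.length - 1) (by omega) hit hks' hkeq'; omega
          rw [hk0] at hkeq'
          exact absurd hkeq' hne
    · -- loop exit
      match hoe : opt with
      | none => rfl
      | some s =>
        obtain ⟨hsl, hsocc, _⟩ := hopt
        exact absurd hsocc (hocc s (by omega))

-- ===== the simple scan of B =====

lemma altGo_found (t p : List Char) (n s : Nat) (hn : n = p.length)
    (hsn : s < n) (hocc : (t.drop s).take p.length = p)
    (hmin : ∀ u, u < s → (t.drop u).take p.length ≠ p) :
    ∀ s0, s0 ≤ s → altGo t p n s0 = PySem.Int.mod ((n : Int) - (s : Int)) (n : Int) := by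
  intro s0 hs0
  induction hk : s - s0 generalizing s0 with
  | zero =>
    have hse : s0 = s := by omega
    subst hse
    rw [altGo, dif_pos hsn, if_pos (by rw [hn]; simpa using hocc)]
  | succ k ihk =>
    have hlt : s0 < n := by omega
    rw [altGo, dif_pos hlt, if_neg ?_]
    · exact ihk (s0 + 1) (by omega) (by omega)
    · have := hmin s0 (by omega)
      rw [hn]
      simpa using this

lemma altGo_none (t p : List Char) (n : Nat) (hn : n = p.length)
    (hmin : ∀ u, u < n → (t.drop u).take p.length ≠ p) :
    ∀ s0, altGo t p n s0 = -1 := by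
  intro s0
  induction hk : n - s0 generalizing s0 with
  | zero =>
    rw [altGo, dif_neg (by omega)]
  | succ k ihk =>
    have hlt : s0 < n := by omega
    rw [altGo, dif_pos hlt, if_neg ?_]
    · exact ihk (s0 + 1) (by omega)
    · have := hmin s0 hlt
      rw [hn]
      simpa using this

-- ===== VERDICT (by name: the statement is the Claim_ definition above) =====
theorem right_circular_shift_spec : Claim_equal_right_circular_shift := by
  intro s1 s2 _
  unfold Spec_right_circular_shift right_circular_shift right_circular_shift_alt
  by_cases hlen : s1.toList.length ≠ s2.toList.length
  · rw [if_pos hlen, if_pos hlen]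
  · rw [if_neg hlen, if_neg hlen]
    have he : s1.toList.length = s2.toList.length := by omega
    set x := s1.toList with hx
    set p := s2.toList with hp
    set t := x ++ x with ht
    have htl : t.length = x.length + x.length := by rw [ht, List.length_append]
    by_cases hn0 : p.length = 0
    · rw [kmpGo, if_neg (by omega), altGo, dif_neg (by omega)]
    · have hp1 : 1 ≤ p.length := by omega
      have hlps := compute_lps_spec p hp1
      have hinv0 : KmpInv t p 0 0 := by
        refine ⟨le_rfl, by omega, by simp, ?_, ?_⟩
        · intro k hk1 _ hks _
          have : p.take k = [] := by simpa using hks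
          have : (p.take k).length = 0 := by rw [this]; rfl
          rw [List.length_take] at this
          omega
        · intro u hu
          omega
      by_cases hex : ∃ u, u + p.length ≤ t.length ∧ (t.drop u).take p.length = p
      · obtain ⟨hs1, hs2⟩ := Nat.find_spec hex
        set s := Nat.find hex with hsdef
        have hminS : ∀ u, u < s → (t.drop u).take p.length ≠ p := by
          intro u hu hcon
          exact Nat.find_min hex hu ⟨by omega, hcon⟩
        have hsn : s < x.length := by
          have hsle : s ≤ x.length := by omega
          rcases Nat.lt_or_ge s x.length with h | h
          · exact h
          · exfalso
            have hse : s = x.length := by omega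
            have hxp : x = p := by
              have : (t.drop x.length).take p.length = p := by rw [← hse]; exact hs2
              rw [ht, List.drop_left, ← he, List.take_length] at this
              exact this
            have hocc0 : (t.drop 0).take p.length = p := by
              rw [List.drop_zero, ht, hxp]
              exact List.take_left
            exact hminS 0 (by omega) hocc0
        rw [kmpGo_spec t p (compute_lps p) x.length (some s) hlps
          ⟨hs1, hs2, hminS⟩ (2 * t.length + 1) 0 0 hinv0 (by omega)]
        rw [altGo_found t p x.length s he hsn hs2 hminS 0 (by omega)]
        rw [he]
      · have hnone : ∀ u, u + p.length ≤ t.length → (t.drop u).take p.length ≠ p := by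
          intro u hu hcon
          exact hex ⟨u, hu, hcon⟩
        rw [kmpGo_spec t p (compute_lps p) x.length none hlps
          hnone (2 * t.length + 1) 0 0 hinv0 (by omega)]
        exact (altGo_none t p x.length he
          (fun u hu => hnone u (by omega)) 0).symm
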